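-- pv_equiv track=rewrite | github.com/pypi-data/pypi-mirror-360 | packages/ytsage/ytsage-4.6.0.tar.gz/ytsage-4.6.0/ytsage/ytsage_gui_dialogs.py | _condense_indices
-- ===== SOURCE A (Python) =====
-- def _condense_indices(indices):
--     """Condenses a list of 1-based indices into a yt-dlp selection string."""
--     if not indices:
--         return ""
--     indices = sorted(list(set(indices)))
--     if not indices: # Check again after sorting/set conversion
--         return ""
--
--     ranges = []
--     start = indices[0]
--     end = indices[0]
--     for i in range(1, len(indices)):
--         if indices[i] == end + 1:
--             end = indices[i]
--         else:
--             if start == end: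
--                 ranges.append(str(start))
--             else:
--                 ranges.append(f"{start}-{end}")
--             start = indices[i]
--             end = indices[i]
--     # Add the last range
--     if start == end:
--         ranges.append(str(start))
--     else:
--         ranges.append(f"{start}-{end}")
--     return ",".join(ranges)
-- ===== SOURCE B (Python) =====
-- def _condense_indices(indices):
--     """Condenses a list of 1-based indices into a yt-dlp selection string."""
--     s = set(indices)
--     starts = sorted(x for x in s if x - 1 not in s)
--     ends = sorted(x for x in s if x + 1 not in s)
--     return ",".join(str(a) if a == b else f"{a}-{b}"
--                     for a, b in zip(starts, ends))
-- ===== Notes on version B (the rewrite author's own statement) =====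
-- stated objective: alternative
-- what changed: Replaces A's single stateful scan (start/end accumulator with flush-on-break) by a set-membership characterization: run starts are the unique values x with x-1 not in the set, run ends those with x+1 not in the set; sorting each and zipping pairs them up, with no run-walking loop at all.
import Mathlib
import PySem

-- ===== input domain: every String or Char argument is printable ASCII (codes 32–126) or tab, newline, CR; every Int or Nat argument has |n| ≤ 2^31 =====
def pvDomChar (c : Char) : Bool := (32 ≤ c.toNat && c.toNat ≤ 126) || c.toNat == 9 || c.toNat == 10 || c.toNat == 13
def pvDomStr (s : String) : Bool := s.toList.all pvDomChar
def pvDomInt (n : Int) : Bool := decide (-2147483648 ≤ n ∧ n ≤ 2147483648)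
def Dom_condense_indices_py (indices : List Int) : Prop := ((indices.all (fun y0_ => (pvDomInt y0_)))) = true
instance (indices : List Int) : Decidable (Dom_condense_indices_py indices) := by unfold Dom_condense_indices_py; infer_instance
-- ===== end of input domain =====

-- B replaces A's stateful scan (start/end accumulator flushed on each break) by a
-- set-membership characterization: run starts are the values x with x-1 not in the
-- set, run ends those with x+1 not in the set; sort each and zip them into pieces.

-- ===== PORT A =====
def condense_indices_py (indices : List Int) : String :=
  if indices = [] then "" else
  match PySem.List.sorted (PySem.Set.ofList indices) (fun x => x) false with
  | [] => ""
  | x :: t =>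
    -- for i in range(1, len(indices)) visits exactly the tail elements in order
    let st := t.foldl (fun (st : List String × Int × Int) xi =>
        if xi = st.2.2 + 1 then (st.1, st.2.1, xi)
        else (st.1 ++ [if st.2.1 = st.2.2 then PySem.Int.toStr st.2.1
                       else PySem.Int.toStr st.2.1 ++ "-" ++ PySem.Int.toStr st.2.2],
              xi, xi)) ([], x, x)
    PySem.Str.join ","
      (st.1 ++ [if st.2.1 = st.2.2 then PySem.Int.toStr st.2.1
                else PySem.Int.toStr st.2.1 ++ "-" ++ PySem.Int.toStr st.2.2])

-- ===== PORT B =====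
-- sorted(<generator over the set s>) is order-insensitive, so it is exactly
-- PySem.List.sorted of the filtered set element list.
def condense_indices_py_alt (indices : List Int) : String :=
  let s := PySem.Set.ofList indices
  let starts := PySem.List.sorted
      (List.filter (fun x => !(PySem.Set.contains s (x - 1))) s) (fun x => x) false
  let ends := PySem.List.sorted
      (List.filter (fun x => !(PySem.Set.contains s (x + 1))) s) (fun x => x) false
  PySem.Str.join ","
    ((starts.zip ends).map (fun p =>
      if p.1 = p.2 then PySem.Int.toStr p.1
      else PySem.Int.toStr p.1 ++ "-" ++ PySem.Int.toStr p.2))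

-- ===== PRECONDITION & SPEC =====
def Spec_condense_indices_py (indices : List Int) (out : String) : Prop := out = condense_indices_py_alt indices
instance (indices : List Int) (out : String) : Decidable (Spec_condense_indices_py indices out) := by unfold Spec_condense_indices_py; infer_instance

-- ===== CLAIM (what is proved, stated in full; the proofs are below) =====
def Claim_equal_condense_indices_py : Prop := ∀ (indices : List Int), Dom_condense_indices_py indices → Spec_condense_indices_py indices (condense_indices_py indices)

-- ===== LEMMAS AND PROOFS =====

-- list-level description of one maximal run: (last value of the run, remainder)
def pvRunSplit : Int → List Int → Int × List Int
  | last, [] => (last, [])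
  | last, y :: ys => if y = last + 1 then pvRunSplit y ys else (last, y :: ys)

theorem pvRunSplit_sublist (last : Int) (ys : List Int) :
    (pvRunSplit last ys).2.Sublist ys := by
  induction ys generalizing last with
  | nil => simp [pvRunSplit]
  | cons y ys ih =>
    simp only [pvRunSplit]
    split
    · exact (ih y).trans (List.sublist_cons_self y ys)
    · simp

theorem pvRunSplit_len_le (last : Int) (ys : List Int) :
    (pvRunSplit last ys).2.length ≤ ys.length :=
  (pvRunSplit_sublist last ys).length_le

-- list-level description of the whole piece list, the common form both ports reach
def pvRuns : List Int → List String
  | [] => []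
  | x :: rest =>
    let s := pvRunSplit x rest
    (if x = s.1 then PySem.Int.toStr x
     else PySem.Int.toStr x ++ "-" ++ PySem.Int.toStr s.1) :: pvRuns s.2
  termination_by xs => xs.length
  decreasing_by
    exact Nat.lt_succ_of_le (pvRunSplit_len_le x rest)

theorem pvRuns_nil : pvRuns [] = [] := by unfold pvRuns; rfl

theorem pvRuns_cons (x : Int) (rest : List Int) :
    pvRuns (x :: rest)
    = (if x = (pvRunSplit x rest).1 then PySem.Int.toStr x
       else PySem.Int.toStr x ++ "-" ++ PySem.Int.toStr (pvRunSplit x rest).1)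
        :: pvRuns (pvRunSplit x rest).2 := by
  conv_lhs => unfold pvRuns

-- A's loop over the tail t, started from (ranges, start, en) and finished by the
-- trailing append, produces ranges ++ the run pieces of pvRuns.
theorem loopA_eq_runs (t : List Int) (ranges : List String) (start en : Int) :
    (t.foldl (fun (st : List String × Int × Int) xi =>
        if xi = st.2.2 + 1 then (st.1, st.2.1, xi)
        else (st.1 ++ [if st.2.1 = st.2.2 then PySem.Int.toStr st.2.1
                       else PySem.Int.toStr st.2.1 ++ "-" ++ PySem.Int.toStr st.2.2],
              xi, xi)) (ranges, start, en)).1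
      ++ [if (t.foldl (fun (st : List String × Int × Int) xi =>
        if xi = st.2.2 + 1 then (st.1, st.2.1, xi)
        else (st.1 ++ [if st.2.1 = st.2.2 then PySem.Int.toStr st.2.1
                       else PySem.Int.toStr st.2.1 ++ "-" ++ PySem.Int.toStr st.2.2],
              xi, xi)) (ranges, start, en)).2.1
              = (t.foldl (fun (st : List String × Int × Int) xi =>
        if xi = st.2.2 + 1 then (st.1, st.2.1, xi)
        else (st.1 ++ [if st.2.1 = st.2.2 then PySem.Int.toStr st.2.1
                       else PySem.Int.toStr st.2.1 ++ "-" ++ PySem.Int.toStr st.2.2],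
              xi, xi)) (ranges, start, en)).2.2
          then PySem.Int.toStr (t.foldl (fun (st : List String × Int × Int) xi =>
        if xi = st.2.2 + 1 then (st.1, st.2.1, xi)
        else (st.1 ++ [if st.2.1 = st.2.2 then PySem.Int.toStr st.2.1
                       else PySem.Int.toStr st.2.1 ++ "-" ++ PySem.Int.toStr st.2.2],
              xi, xi)) (ranges, start, en)).2.1
          else PySem.Int.toStr (t.foldl (fun (st : List String × Int × Int) xi =>
        if xi = st.2.2 + 1 then (st.1, st.2.1, xi)
        else (st.1 ++ [if st.2.1 = st.2.2 then PySem.Int.toStr st.2.1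
                       else PySem.Int.toStr st.2.1 ++ "-" ++ PySem.Int.toStr st.2.2],
              xi, xi)) (ranges, start, en)).2.1 ++ "-"
            ++ PySem.Int.toStr (t.foldl (fun (st : List String × Int × Int) xi =>
        if xi = st.2.2 + 1 then (st.1, st.2.1, xi)
        else (st.1 ++ [if st.2.1 = st.2.2 then PySem.Int.toStr st.2.1
                       else PySem.Int.toStr st.2.1 ++ "-" ++ PySem.Int.toStr st.2.2],
              xi, xi)) (ranges, start, en)).2.2]
    = ranges ++ (if start = (pvRunSplit en t).1 then PySem.Int.toStr start
                 else PySem.Int.toStr start ++ "-" ++ PySem.Int.toStr (pvRunSplit en t).1)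
          :: pvRuns (pvRunSplit en t).2 := by
  induction t generalizing ranges start en with
  | nil => simp [pvRunSplit, pvRuns_nil]
  | cons y ys ih =>
    simp only [List.foldl_cons]
    by_cases h : y = en + 1
    · rw [if_pos h, show pvRunSplit en (y :: ys) = pvRunSplit y ys by simp [pvRunSplit, h]]
      exact ih ranges start y
    · rw [if_neg h, show pvRunSplit en (y :: ys) = (en, y :: ys) by simp [pvRunSplit, h]]
      rw [ih (ranges ++ [_]) y y, pvRuns_cons]
      simp

-- On a strictly increasing list, filtering for "x-1 not a member" keeps exactly
-- the head of each maximal run, membership re-relativized to the remainder.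
theorem filter_starts (x : Int) (rest : List Int)
    (h : (x :: rest).Pairwise (· < ·)) :
    (x :: rest).filter (fun y => !(decide ((y - 1) ∈ x :: rest)))
      = x :: (pvRunSplit x rest).2.filter
          (fun y => !(decide ((y - 1) ∈ (pvRunSplit x rest).2))) := by
  induction rest generalizing x with
  | nil =>
    simp [pvRunSplit, List.filter]
  | cons y ys ih =>
    have hxy : x < y := (List.pairwise_cons.1 h).1 y (by simp)
    have hys : ∀ z ∈ ys, y < z := (List.pairwise_cons.1 (List.pairwise_cons.1 h).2).1
    have hxs : ∀ z ∈ ys, x < z := fun z hz => lt_trans hxy (hys z hz)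
    have hxkeep : ¬ ((x - 1) ∈ x :: y :: ys) := by
      intro hm
      rcases List.mem_cons.1 hm with h1 | hm
      · omega
      rcases List.mem_cons.1 hm with h1 | hm
      · omega
      · exact absurd (hxs _ hm) (by omega)
    by_cases hy : y = x + 1
    · have hsplit : pvRunSplit x (y :: ys) = pvRunSplit y ys := by
        simp [pvRunSplit, hy]
      have hydrop : ((y - 1) ∈ x :: y :: ys) := by
        simp [hy]
      have hcong : ∀ z ∈ ys,
          (!(decide ((z - 1) ∈ x :: y :: ys))) = (!(decide ((z - 1) ∈ y :: ys))) := by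
        intro z hz
        have hzy := hys z hz
        simp only [List.mem_cons]
        have : ¬ (z - 1 = x) := by omega
        simp [this]
      have hyhead : ¬ ((y - 1) ∈ y :: ys) := by
        intro hm
        rcases List.mem_cons.1 hm with h1 | hm
        · omega
        · exact absurd (hys _ hm) (by omega)
      have ihy := ih y (List.pairwise_cons.1 h).2
      rw [List.filter_cons_of_pos (by simp [hyhead])] at ihy
      simp only [List.cons.injEq, true_and] at ihy
      rw [hsplit, List.filter_cons_of_pos (by simp [hxkeep]),
          List.filter_cons_of_neg (by simp [hydrop]),
          List.filter_congr hcong, ihy]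
    · have hsplit : pvRunSplit x (y :: ys) = (x, y :: ys) := by
        simp [pvRunSplit, hy]
      have hcong : ∀ z ∈ (y :: ys),
          (!(decide ((z - 1) ∈ x :: y :: ys))) = (!(decide ((z - 1) ∈ y :: ys))) := by
        intro z hz
        have hzx : x + 2 ≤ z := by
          rcases List.mem_cons.1 hz with rfl | hz'
          · omega
          · have := hys z hz'; omega
        simp only [List.mem_cons]
        have : ¬ (z - 1 = x) := by omega
        simp [this]
      rw [hsplit, List.filter_cons_of_pos (by simp [hxkeep]),
          List.filter_congr hcong]

-- Dual: filtering for "x+1 not a member" keeps exactly the last of each run.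
theorem filter_ends (x : Int) (rest : List Int)
    (h : (x :: rest).Pairwise (· < ·)) :
    (x :: rest).filter (fun y => !(decide ((y + 1) ∈ x :: rest)))
      = (pvRunSplit x rest).1 :: (pvRunSplit x rest).2.filter
          (fun y => !(decide ((y + 1) ∈ (pvRunSplit x rest).2))) := by
  induction rest generalizing x with
  | nil =>
    simp [pvRunSplit, List.filter]
  | cons y ys ih =>
    have hxy : x < y := (List.pairwise_cons.1 h).1 y (by simp)
    have hys : ∀ z ∈ ys, y < z := (List.pairwise_cons.1 (List.pairwise_cons.1 h).2).1
    by_cases hy : y = x + 1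
    · have hsplit : pvRunSplit x (y :: ys) = pvRunSplit y ys := by
        simp [pvRunSplit, hy]
      have hxdrop : ((x + 1) ∈ x :: y :: ys) := by simp [hy]
      have hcong : ∀ z ∈ (y :: ys),
          (!(decide ((z + 1) ∈ x :: y :: ys))) = (!(decide ((z + 1) ∈ y :: ys))) := by
        intro z hz
        have hzx : x < z := by
          rcases List.mem_cons.1 hz with rfl | hz'
          · omega
          · have := hys z hz'; omega
        simp only [List.mem_cons]
        have : ¬ (z + 1 = x) := by omega
        simp [this]
      rw [hsplit, List.filter_cons_of_neg (by simp [hxdrop]),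
          List.filter_congr hcong, ih y (List.pairwise_cons.1 h).2]
    · have hsplit : pvRunSplit x (y :: ys) = (x, y :: ys) := by
        simp [pvRunSplit, hy]
      have hxkeep : ¬ ((x + 1) ∈ x :: y :: ys) := by
        intro hm
        rcases List.mem_cons.1 hm with h1 | hm
        · omega
        rcases List.mem_cons.1 hm with h1 | hm
        · omega
        · exact absurd (hys _ hm) (by omega)
      have hcong : ∀ z ∈ (y :: ys),
          (!(decide ((z + 1) ∈ x :: y :: ys))) = (!(decide ((z + 1) ∈ y :: ys))) := by
        intro z hz
        have hzx : x < z := by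
          rcases List.mem_cons.1 hz with rfl | hz'
          · omega
          · have := hys z hz'; omega
        simp only [List.mem_cons]
        have : ¬ (z + 1 = x) := by omega
        simp [this]
      rw [hsplit, List.filter_cons_of_pos (by simp [hxkeep]),
          List.filter_congr hcong]

-- zipping the start values with the end values reconstructs the run pieces
theorem zip_filters_eq_runs (l : List Int) (h : l.Pairwise (· < ·)) :
    ((l.filter (fun y => !(decide ((y - 1) ∈ l)))).zip
       (l.filter (fun y => !(decide ((y + 1) ∈ l))))).map
      (fun p => if p.1 = p.2 then PySem.Int.toStr p.1
                else PySem.Int.toStr p.1 ++ "-" ++ PySem.Int.toStr p.2)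
    = pvRuns l := by
  match l with
  | [] => simp [pvRuns_nil]
  | x :: rest =>
    rw [filter_starts x rest h, filter_ends x rest h, List.zip_cons_cons,
        List.map_cons, pvRuns_cons]
    refine congrArg₂ _ rfl ?_
    exact zip_filters_eq_runs (pvRunSplit x rest).2
      (h.sublist ((pvRunSplit_sublist x rest).trans (List.sublist_cons_self x rest)))
  termination_by l.length
  decreasing_by
    exact Nat.lt_succ_of_le (pvRunSplit_len_le x rest)

-- sorting a filtered set is filtering the sorted set element list
theorem sorted_filter_set (indices : List Int) (p : Int → Bool) :
    PySem.List.sorted (List.filter p (PySem.Set.ofList indices)) (fun x => x) false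
      = List.filter p
          (PySem.List.sorted (PySem.Set.ofList indices) (fun x => x) false) := by
  apply PySem.List.sorted_eq_of_perm_of_pairwise_lt
  · exact (PySem.List.sorted_perm _ _ _).filter p
  · exact (PySem.List.sorted_ofList_pairwise_lt indices).filter p

theorem condense_indices_py_spec : Claim_equal_condense_indices_py := by
  intro indices _
  show condense_indices_py indices = condense_indices_py_alt indices
  unfold condense_indices_py condense_indices_py_alt
  simp only [sorted_filter_set]
  have hmem : ∀ y : Int,
      PySem.Set.contains (PySem.Set.ofList indices) y
        = decide (y ∈ PySem.List.sorted (PySem.Set.ofList indices) (fun x => x) false) := by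
    intro y
    by_cases hy : y ∈ PySem.Set.ofList indices
    · rw [decide_eq_true ((PySem.List.mem_sorted _ _ _ _).2 hy)]
      exact (PySem.Set.contains_iff _ _).2 hy
    · rw [decide_eq_false (fun hm => hy ((PySem.List.mem_sorted _ _ _ _).1 hm))]
      exact Bool.eq_false_iff.2 (fun hc => hy ((PySem.Set.contains_iff _ _).1 hc))
  by_cases hnil : indices = []
  · subst hnil
    simp [PySem.Set.ofList, PySem.List.sorted, PySem.Str.join]
  · simp only [if_neg hnil]
    cases hs : PySem.List.sorted (PySem.Set.ofList indices) (fun x => x) false with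
    | nil => simp [PySem.Str.join, List.filter]
    | cons x t =>
      have hpair : (x :: t).Pairwise (· < ·) := by
        rw [← hs]; exact PySem.List.sorted_ofList_pairwise_lt indices
      have h1 : List.filter (fun y => !(PySem.Set.contains (PySem.Set.ofList indices) (y - 1))) (x :: t)
          = List.filter (fun y => !(decide ((y - 1) ∈ x :: t))) (x :: t) := by
        apply List.filter_congr
        intro z _
        rw [hmem (z - 1), hs]
      have h2 : List.filter (fun y => !(PySem.Set.contains (PySem.Set.ofList indices) (y + 1))) (x :: t)
          = List.filter (fun y => !(decide ((y + 1) ∈ x :: t))) (x :: t) := by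
        apply List.filter_congr
        intro z _
        rw [hmem (z + 1), hs]
      rw [h1, h2, zip_filters_eq_runs (x :: t) hpair, pvRuns_cons]
      exact congrArg (PySem.Str.join ",") ((loopA_eq_runs t [] x x).trans (List.nil_append _))

-- ===== VERDICT (by name: the statement is the Claim_ definition above) =====
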